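-- pv_equiv track=rewrite | github.com/MrBrantCode/unitest_baseline | mut_generate/mist_train_taco/taco_8970/solution.py | count_valid_paths
-- ===== SOURCE A (Python) =====
-- def count_valid_paths(heights):
--     n = len(heights)
--     if n < 2:
--         return 0
--
--     # Sort the indices based on the heights
--     hhs = sorted(enumerate(heights), key=lambda t: (t[1], t[0]))
--
--     # Initialize prev and next arrays
--     prev = list(range(-1, n - 1))
--     next = list(range(1, n + 1))
--
--     (firsti, firsth) = (lasti, lasth) = hhs[0]
--     block_len = 1
--     s = 0
--
--     for (i, h) in hhs[1:]:
--         if h == lasth and i == next[lasti]: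
--             block_len += 1
--             lasti = i
--         else:
--             s += block_len * (block_len - 1)
--             (pi, ni) = (prev[firsti], next[lasti])
--             if pi >= 0:
--                 next[pi] = ni
--             if ni < n:
--                 prev[ni] = pi
--             (firsti, firsth) = (lasti, lasth) = (i, h)
--             block_len = 1
--
--     s += block_len * (block_len - 1)
--     return s
-- ===== SOURCE B (Python) =====
-- def count_valid_paths(heights):
--     # One left-to-right pass with a monotonic stack of [height, count] entries
--     # (heights strictly decreasing bottom to top).  When a strictly taller
--     # height arrives, each popped group of equal heights contributes
--     # count * (count - 1) ordered pairs; equal tops merge.  The remaining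
--     # groups are drained at the end.
--     total = 0
--     stack = []
--     for h in heights:
--         while stack and stack[-1][0] < h:
--             c = stack.pop()[1]
--             total += c * (c - 1)
--         if stack and stack[-1][0] == h:
--             stack[-1][1] += 1
--         else:
--             stack.append([h, 1])
--     for _, c in stack:
--         total += c * (c - 1)
--     return total
-- ===== Notes on version B (the rewrite author's own statement) =====
-- stated objective: faster
-- what changed: Replaces A's sort-by-(height,index) plus doubly-linked-list block splicing by a single left-to-right pass with a monotonic stack of (height, count) entries, adding count*(count-1) whenever a group is popped by a strictly taller height or drained at the end.
import Mathlib
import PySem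

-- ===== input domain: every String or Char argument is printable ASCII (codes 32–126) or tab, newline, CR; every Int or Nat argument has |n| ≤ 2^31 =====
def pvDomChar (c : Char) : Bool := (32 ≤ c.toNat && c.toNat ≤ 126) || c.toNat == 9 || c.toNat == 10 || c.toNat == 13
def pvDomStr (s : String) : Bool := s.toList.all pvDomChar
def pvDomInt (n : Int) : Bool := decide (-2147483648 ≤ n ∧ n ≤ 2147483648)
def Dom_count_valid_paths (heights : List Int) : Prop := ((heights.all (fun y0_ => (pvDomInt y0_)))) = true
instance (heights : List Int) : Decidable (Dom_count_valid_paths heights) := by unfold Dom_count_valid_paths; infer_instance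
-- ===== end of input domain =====

-- B replaces A's sort-by-(height,index) plus doubly-linked-list block merging by a
-- single left-to-right pass over a monotonic stack of (height, count) entries;
-- objective: faster (no sort, one pass).

-- ===== PORT A =====
-- loop state: (prev, next, firsti, firsth, lasti, lasth, block_len, s)
def pvStepA (n : Int)
    (st : List Int × List Int × Int × Int × Int × Int × Int × Int) (e : Int × Int) :
    List Int × List Int × Int × Int × Int × Int × Int × Int :=
  match st, e with
  | (prev, next, firsti, firsth, lasti, lasth, block_len, s), (i, h) =>
    if h = lasth ∧ i = PySem.List.pyGetD next lasti 0 then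
      (prev, next, firsti, firsth, i, lasth, block_len + 1, s)
    else
      let s' := s + block_len * (block_len - 1)
      let pi := PySem.List.pyGetD prev firsti 0
      let ni := PySem.List.pyGetD next lasti 0
      let next' := if pi ≥ 0 then PySem.List.pySetD next pi ni else next
      let prev' := if ni < n then PySem.List.pySetD prev ni pi else prev
      (prev', next', i, h, i, h, 1, s')


def count_valid_paths (heights : List Int) : Int :=
  let n : Int := PySem.List.len heights
  if n < 2 then 0
  else
    -- sorted(enumerate(heights), key=lambda t: (t[1], t[0])); Python's tuple
    -- comparison is lexicographic, which is toLex on Int × Int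
    let hhs := PySem.List.sorted (PySem.List.enumerate heights 0) (fun t => toLex (t.2, t.1)) false
    let prev := PySem.List.pyRange (-1) (n - 1) 1
    let next := PySem.List.pyRange 1 (n + 1) 1
    let e0 := PySem.List.pyGetD hhs 0 (0, 0)
    let fin := (PySem.List.slice hhs (some 1) none).foldl (pvStepA n)
        (prev, next, e0.1, e0.2, e0.1, e0.2, 1, 0)
    fin.2.2.2.2.2.2.2 + fin.2.2.2.2.2.2.1 * (fin.2.2.2.2.2.2.1 - 1)

-- ===== PORT B =====
-- Python's stack list (top = last element) is ported with the TOP at the HEAD of the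
-- Lean list; pvPop is the `while stack and stack[-1][0] < h` loop, pvPush the
-- merge-or-append step, and the final reversed fold is `for _, c in stack: ...`.
def pvPop (st : List (Int × Int)) (h : Int) (total : Int) : List (Int × Int) × Int :=
  match st with
  | [] => ([], total)
  | (x, c) :: t => if x < h then pvPop t h (total + c * (c - 1)) else ((x, c) :: t, total)

def pvPush (st : List (Int × Int)) (h : Int) : List (Int × Int) :=
  match st with
  | (x, c) :: t => if x = h then (x, c + 1) :: t else (h, 1) :: (x, c) :: t
  | [] => [(h, 1)]

def pvStepB (st : List (Int × Int) × Int) (h : Int) : List (Int × Int) × Int :=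
  let r := pvPop st.1 h st.2
  (pvPush r.1 h, r.2)

def count_valid_paths_alt (heights : List Int) : Int :=
  let fin := heights.foldl pvStepB ([], 0)
  fin.1.reverse.foldl (fun acc e => acc + e.2 * (e.2 - 1)) fin.2


-- ===== PRECONDITION & SPEC =====
def Spec_count_valid_paths (heights : List Int) (out : Int) : Prop := out = count_valid_paths_alt heights
instance (heights : List Int) (out : Int) : Decidable (Spec_count_valid_paths heights out) := by unfold Spec_count_valid_paths; infer_instance

-- ===== CLAIM (what is proved, stated in full; the proofs are below) =====
def Claim_equal_count_valid_paths : Prop := ∀ (heights : List Int), Dom_count_valid_paths heights → Spec_count_valid_paths heights (count_valid_paths heights)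

-- ===== LEMMAS AND PROOFS =====

-- reference form of the count (B's old direct scan): for each left endpoint, twice
-- the number of equal heights before the first strictly taller one
def pvCnt (h : Int) : List Int → Int
  | [] => 0
  | x :: t => if x > h then 0 else (if x = h then 2 else 0) + pvCnt h t
def pvScan : List Int → Int
  | [] => 0
  | h :: t => pvCnt h t + pvScan t


def hAt (hs : List Int) (j : Nat) : Int := hs.getD j 0
def pvTerm (hs : List Int) (j : Nat) : Int := pvCnt (hAt hs j) (hs.drop (j + 1))

lemma pvScan_eq_sum (hs : List Int) :
    pvScan hs = ∑ j ∈ Finset.range hs.length, pvTerm hs j := by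
  induction hs with
  | nil => simp [pvScan]
  | cons h t ih =>
    have h0 : pvTerm (h :: t) 0 = pvCnt h t := by simp [pvTerm, hAt]
    have hsucc : ∀ j : Nat, pvTerm (h :: t) (j + 1) = pvTerm t j := by
      intro j; simp [pvTerm, hAt]
    simp only [pvScan, ih, List.length_cons, Finset.sum_range_succ']
    simp [h0, hsucc]
    ring

lemma pvCnt_drop_char (hs : List Int) (h : Int) (m : Nat) :
    pvCnt h (hs.drop m) =
      2 * (((Finset.Ico m hs.length).filter
        (fun k => hAt hs k = h ∧ ∀ q : Nat, m ≤ q → q < k → hAt hs q ≤ h)).card : Int) := by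
  by_cases hm : m < hs.length
  · have IH := pvCnt_drop_char hs h (m + 1)
    have hdrop : hs.drop m = hs[m] :: hs.drop (m + 1) := List.drop_eq_getElem_cons hm
    have hatm : hAt hs m = hs[m] := by simp [hAt, List.getD_eq_getElem?_getD, hm]
    rw [hdrop]
    by_cases hgt : hs[m] > h
    · have hempty : ((Finset.Ico m hs.length).filter
          (fun k => hAt hs k = h ∧ ∀ q : Nat, m ≤ q → q < k → hAt hs q ≤ h)) = ∅ := by
        apply Finset.filter_eq_empty_iff.mpr
        intro k hk
        simp only [Finset.mem_Ico] at hk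
        rintro ⟨hkh, hall⟩
        rcases Nat.eq_or_lt_of_le hk.1 with heq | hlt
        · exact absurd hkh (by rw [← heq, hatm]; omega)
        · have := hall m (le_refl m) hlt; rw [hatm] at this; omega
      rw [hempty]
      simp [pvCnt, hgt]
    · have hle : ¬ (hs[m] > h) := hgt
      have hset : ((Finset.Ico m hs.length).filter
          (fun k => hAt hs k = h ∧ ∀ q : Nat, m ≤ q → q < k → hAt hs q ≤ h)) =
          (if hAt hs m = h then insert m (((Finset.Ico (m+1) hs.length).filter
            (fun k => hAt hs k = h ∧ ∀ q : Nat, m + 1 ≤ q → q < k → hAt hs q ≤ h)))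
           else ((Finset.Ico (m+1) hs.length).filter
            (fun k => hAt hs k = h ∧ ∀ q : Nat, m + 1 ≤ q → q < k → hAt hs q ≤ h))) := by
        ext k
        simp only [Finset.mem_filter, Finset.mem_Ico]
        constructor
        · rintro ⟨⟨hk1, hk2⟩, hkh, hall⟩
          rcases Nat.eq_or_lt_of_le hk1 with heq | hlt
          · subst heq; rw [hkh]; simp
          · have hmem : k ∈ (Finset.Ico (m+1) hs.length).filter
                (fun k => hAt hs k = h ∧ ∀ q : Nat, m + 1 ≤ q → q < k → hAt hs q ≤ h) := by
              simp only [Finset.mem_filter, Finset.mem_Ico]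
              exact ⟨⟨hlt, hk2⟩, hkh, fun q hq1 hq2 => hall q (by omega) hq2⟩
            split <;> simp [Finset.mem_insert, hmem]
        · intro hk
          have hcase : k = m ∧ hAt hs m = h ∨ (m + 1 ≤ k ∧ k < hs.length ∧ hAt hs k = h ∧
              ∀ q : Nat, m + 1 ≤ q → q < k → hAt hs q ≤ h) := by
            split at hk
            · rcases Finset.mem_insert.mp hk with rfl | hk'
              · left; exact ⟨rfl, by assumption⟩
              · right; simpa [Finset.mem_filter, Finset.mem_Ico, and_assoc] using hk'
            · right; simpa [Finset.mem_filter, Finset.mem_Ico, and_assoc] using hk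
          rcases hcase with ⟨rfl, hh⟩ | ⟨hk1, hk2, hkh, hall⟩
          · exact ⟨⟨le_refl _, hm⟩, hh, fun q hq1 hq2 => by omega⟩
          · refine ⟨⟨by omega, hk2⟩, hkh, fun q hq1 hq2 => ?_⟩
            rcases Nat.eq_or_lt_of_le hq1 with heq | hlt
            · rw [← heq, hatm]; omega
            · exact hall q (by omega) hq2
      rw [hset]
      by_cases hh : hAt hs m = h
      · have hnotmem : m ∉ ((Finset.Ico (m+1) hs.length).filter
            (fun k => hAt hs k = h ∧ ∀ q : Nat, m + 1 ≤ q → q < k → hAt hs q ≤ h)) := by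
          simp [Finset.mem_filter, Finset.mem_Ico]
        simp only [hh, if_true, Finset.card_insert_of_notMem hnotmem]
        have hxh : hs[m] = h := by rw [← hatm, hh]
        simp only [pvCnt]
        rw [if_neg hgt, if_pos hxh, IH]
        push_cast
        ring
      · have hxh : ¬ (hs[m] = h) := by rw [← hatm]; exact hh
        simp only [hh, if_false]
        simp only [pvCnt]
        rw [if_neg hgt, if_neg hxh, IH]
        ring
  · have hdrop : hs.drop m = [] := List.drop_of_length_le (by omega)
    have : Finset.Ico m hs.length = ∅ := Finset.Ico_eq_empty (by omega)
    rw [hdrop, this]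
    simp [pvCnt]
termination_by hs.length - m
decreasing_by omega

lemma pv_pairs_sum_nat (S : Finset Nat) :
    (∑ j ∈ S, 2 * (S.filter (fun k => j < k)).card) = S.card * (S.card - 1) := by
  induction S using Finset.strongInduction with
  | _ S ih =>
    rcases S.eq_empty_or_nonempty with rfl | hne
    · simp
    · set m := S.min' hne with hm
      have hmem : m ∈ S := S.min'_mem hne
      have hsum : ∑ j ∈ S, 2 * (S.filter (fun k => j < k)).card =
          2 * (S.filter (fun k => m < k)).card +
          ∑ j ∈ S.erase m, 2 * (S.filter (fun k => j < k)).card := by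
        rw [← Finset.add_sum_erase _ _ hmem]
      have hfm : S.filter (fun k => m < k) = S.erase m := by
        ext k
        simp only [Finset.mem_filter, Finset.mem_erase]
        constructor
        · rintro ⟨hk, hlt⟩; exact ⟨by omega, hk⟩
        · rintro ⟨hne', hk⟩
          exact ⟨hk, lt_of_le_of_ne (S.min'_le k hk) (Ne.symm hne')⟩
      have hfj : ∀ j ∈ S.erase m, S.filter (fun k => j < k) = (S.erase m).filter (fun k => j < k) := by
        intro j hj
        have hjm : m < j := by
          rcases Finset.mem_erase.mp hj with ⟨hne', hj'⟩
          exact lt_of_le_of_ne (S.min'_le j hj') (Ne.symm hne')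
        ext k
        simp only [Finset.mem_filter, Finset.mem_erase]
        constructor
        · rintro ⟨hk, hlt⟩; exact ⟨⟨by omega, hk⟩, hlt⟩
        · rintro ⟨⟨_, hk⟩, hlt⟩; exact ⟨hk, hlt⟩
      have herase := ih (S.erase m) (Finset.erase_ssubset hmem)
      have hcard : (S.erase m).card = S.card - 1 := Finset.card_erase_of_mem hmem
      have hcardpos : 1 ≤ S.card := Finset.card_pos.mpr hne
      rw [hsum, hfm, Finset.sum_congr rfl (fun j hj => by rw [hfj j hj]), herase, hcard]
      obtain ⟨k, hk⟩ : ∃ k, S.card = k + 1 := ⟨S.card - 1, by omega⟩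
      rw [hk]
      cases k with
      | zero => simp
      | succ k2 => simp only [Nat.add_sub_cancel]; ring

lemma pv_pairs_sum (S : Finset Nat) :
    (∑ j ∈ S, 2 * (((S.filter (fun k => j < k)).card : Int))) =
      (S.card : Int) * ((S.card : Int) - 1) := by
  have h := pv_pairs_sum_nat S
  have : (∑ j ∈ S, 2 * (((S.filter (fun k => j < k)).card : Int))) =
      ((∑ j ∈ S, 2 * (S.filter (fun k => j < k)).card : Nat) : Int) := by
    push_cast; rfl
  rw [this, h]
  cases hc : S.card with
  | zero => simp
  | succ n => push_cast [Nat.succ_sub_one]; ring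

lemma pv_mem_enumerate (hs : List Int) (p : Int × Int) :
    p ∈ PySem.List.enumerate hs 0 ↔ ∃ k : Nat, k < hs.length ∧ p = ((k : Int), hAt hs k) := by
  rw [PySem.List.mem_enumerate_iff]
  constructor
  · rintro ⟨k, hk, rfl⟩
    exact ⟨k, hk, by simp [hAt, List.getD_eq_getElem?_getD, hk]⟩
  · rintro ⟨k, hk, rfl⟩
    exact ⟨k, hk, by simp [hAt, List.getD_eq_getElem?_getD, hk]⟩

def blockSet (hs : List Int) (fh fi li : Int) : Finset Nat :=
  (Finset.range hs.length).filter (fun k => fi ≤ (k : Int) ∧ (k : Int) ≤ li ∧ hAt hs k = fh)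

lemma pv_block_sum (hs : List Int) (fh fi li : Int)
    (hmid : ∀ k : Nat, fi < (k : Int) → (k : Int) < li → hAt hs k ≤ fh)
    (hend : ∀ k : Nat, li < (k : Int) → k < hs.length → hAt hs k = fh →
        ∃ m : Nat, li < (m : Int) ∧ (m : Int) < (k : Int) ∧ fh < hAt hs m) :
    (∑ j ∈ blockSet hs fh fi li, pvTerm hs j) =
      ((blockSet hs fh fi li).card : Int) * (((blockSet hs fh fi li).card : Int) - 1) := by
  have hterm : ∀ j ∈ blockSet hs fh fi li,
      pvTerm hs j = 2 * (((blockSet hs fh fi li).filter (fun k => j < k)).card : Int) := by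
    intro j hj
    simp only [blockSet, Finset.mem_filter, Finset.mem_range] at hj
    obtain ⟨hjr, hjfi, hjli, hjh⟩ := hj
    have hchar := pvCnt_drop_char hs fh (j + 1)
    rw [pvTerm, hjh, hchar]
    have hsets : ((Finset.Ico (j + 1) hs.length).filter
        (fun k => hAt hs k = fh ∧ ∀ q : Nat, j + 1 ≤ q → q < k → hAt hs q ≤ fh)) =
        ((blockSet hs fh fi li).filter (fun k => j < k)) := by
      ext k
      simp only [blockSet, Finset.mem_filter, Finset.mem_Ico, Finset.mem_range]
      constructor
      · rintro ⟨⟨hk1, hk2⟩, hkh, hall⟩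
        have hkli : (k : Int) ≤ li := by
          by_contra hko
          obtain ⟨m, hm1, hm2, hm3⟩ := hend k (by omega) hk2 hkh
          have : hAt hs m ≤ fh := hall m (by omega) (by omega)
          omega
        exact ⟨⟨hk2, by omega, hkli, hkh⟩, by omega⟩
      · rintro ⟨⟨hk2, hkfi, hkli, hkh⟩, hjk⟩
        refine ⟨⟨by omega, hk2⟩, hkh, fun q hq1 hq2 => ?_⟩
        exact hmid q (by omega) (by omega)
    rw [hsets]
  rw [Finset.sum_congr rfl hterm, pv_pairs_sum]

def keyLt (p q : Int × Int) : Prop := p.2 < q.2 ∨ (p.2 = q.2 ∧ p.1 < q.1)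

lemma keyLt_bridge (p q : Int × Int) : toLex (p.2, p.1) < toLex (q.2, q.1) ↔ keyLt p q := by
  rw [Prod.Lex.toLex_lt_toLex]; rfl

lemma keyLt_asymm (p q : Int × Int) : keyLt p q → keyLt q p → False := by
  unfold keyLt; omega

lemma keyLt_irrefl (p : Int × Int) : ¬ keyLt p p := by
  unfold keyLt; omega

def aliveb (hs : List Int) (fh fi : Int) (j : Nat) : Bool :=
  decide (fh < hAt hs j) || (decide (hAt hs j = fh) && decide (fi ≤ (j : Int)))

lemma aliveb_true_iff (hs : List Int) (fh fi : Int) (j : Nat) :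
    aliveb hs fh fi j = true ↔ (fh < hAt hs j ∨ (hAt hs j = fh ∧ fi ≤ (j : Int))) := by
  simp [aliveb]

lemma aliveb_false_iff (hs : List Int) (fh fi : Int) (j : Nat) :
    aliveb hs fh fi j = false ↔ ¬ (fh < hAt hs j ∨ (hAt hs j = fh ∧ fi ≤ (j : Int))) := by
  rw [← aliveb_true_iff]
  simp

lemma mem_blockSet (hs : List Int) (fh fi li : Int) (k : Nat) :
    k ∈ blockSet hs fh fi li ↔
      k < hs.length ∧ fi ≤ (k : Int) ∧ (k : Int) ≤ li ∧ hAt hs k = fh := by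
  simp [blockSet, Finset.mem_filter, Finset.mem_range]

lemma pv_done_key (done rest : List (Int × Int)) (li fh : Int)
    (hsort : (done ++ rest).Pairwise keyLt) (hlast : done.getLast? = some (li, fh)) :
    ∀ p ∈ done, p = (li, fh) ∨ keyLt p (li, fh) := by
  obtain ⟨d', rfl⟩ := List.getLast?_eq_some_iff.mp hlast
  intro p hp
  rcases List.mem_append.mp hp with hp' | hp'
  · right
    have hpw : (d' ++ ((li, fh) :: rest)).Pairwise keyLt := by
      simpa using hsort
    exact (List.pairwise_append.mp hpw).2.2 p hp' (li, fh) (List.mem_cons_self)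
  · left; simpa using hp'

lemma pv_rest_key (done rest : List (Int × Int)) (li fh : Int)
    (hsort : (done ++ rest).Pairwise keyLt) (hlast : done.getLast? = some (li, fh)) :
    ∀ q ∈ rest, keyLt (li, fh) q := by
  intro q hq
  have hmem : (li, fh) ∈ done := by
    obtain ⟨d', rfl⟩ := List.getLast?_eq_some_iff.mp hlast
    simp
  exact (List.pairwise_append.mp hsort).2.2 (li, fh) hmem q hq

lemma pv_unprocessed (done rest : List (Int × Int)) (li fh : Int) (p : Int × Int)
    (hsort : (done ++ rest).Pairwise keyLt) (hlast : done.getLast? = some (li, fh))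
    (hp : p ∈ done ++ rest) (hk : keyLt (li, fh) p) : p ∈ rest := by
  rcases List.mem_append.mp hp with hp' | hp'
  · rcases pv_done_key done rest li fh hsort hlast p hp' with rfl | hlt
    · exact absurd hk (keyLt_irrefl _)
    · exact absurd hk (fun h => keyLt_asymm _ _ hlt h)
  · exact hp'

def closedSum (hs : List Int) (fh fi : Int) : Int :=
  ∑ j ∈ (Finset.range hs.length).filter (fun j => aliveb hs fh fi j = false), pvTerm hs j

structure InvA (hs : List Int) (prev next : List Int) (fi fh li bl s : Int) : Prop where
  hfi0 : 0 ≤ fi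
  hfil : fi ≤ li
  hlin : li < (hs.length : Int)
  hhfi : hAt hs fi.toNat = fh
  hhli : hAt hs li.toNat = fh
  hmid : ∀ k : Nat, fi < (k : Int) → (k : Int) < li → hAt hs k ≤ fh
  hbl : bl = ((blockSet hs fh fi li).card : Int)
  hgs : ∀ j : Nat, (j : Int) < fi → hAt hs j = fh →
      ∃ m : Nat, (j : Int) < (m : Int) ∧ (m : Int) < fi ∧ fh < hAt hs m
  hplen : prev.length = hs.length
  hnlen : next.length = hs.length
  hnext : ∀ j : Nat, j < hs.length → aliveb hs fh fi j = true →
      (j : Int) < next.getD j 0 ∧ next.getD j 0 ≤ (hs.length : Int) ∧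
      (next.getD j 0 < (hs.length : Int) → aliveb hs fh fi (next.getD j 0).toNat = true) ∧
      (∀ k : Nat, (j : Int) < (k : Int) → (k : Int) < next.getD j 0 → aliveb hs fh fi k = false)
  hprev : ∀ j : Nat, j < hs.length → aliveb hs fh fi j = true →
      prev.getD j 0 < (j : Int) ∧ -1 ≤ prev.getD j 0 ∧
      (0 ≤ prev.getD j 0 → aliveb hs fh fi (prev.getD j 0).toNat = true) ∧
      (∀ k : Nat, prev.getD j 0 < (k : Int) → (k : Int) < (j : Int) → aliveb hs fh fi k = false)
  hsum : s = closedSum hs fh fi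

lemma pv_pyGetD (xs : List Int) (t : Int) (hnn : 0 ≤ t) :
    PySem.List.pyGetD xs t 0 = xs.getD t.toNat 0 := by
  conv_lhs => rw [← Int.toNat_of_nonneg hnn]
  exact PySem.List.pyGetD_natCast ..

lemma pv_getD_set (xs : List Int) (a : Nat) (v : Int) (j : Nat) (ha : a < xs.length) :
    (xs.set a v).getD j 0 = if j = a then v else xs.getD j 0 := by
  by_cases hj : j = a
  · subst hj
    simp [List.getD_eq_getElem?_getD, ha]
  · simp [List.getD_eq_getElem?_getD, List.getElem?_set_ne (by omega : a ≠ j), hj]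

lemma keyLt_iff (a b c d : Int) : keyLt (a, b) (c, d) ↔ (b < d ∨ (b = d ∧ a < c)) := Iff.rfl

lemma pvFoldA (hs : List Int) (rest : List (Int × Int)) :
    ∀ (done : List (Int × Int)) (prev next : List Int) (fi fh li bl s : Int),
    (done ++ rest).Perm (PySem.List.enumerate hs 0) →
    (done ++ rest).Pairwise keyLt →
    done.getLast? = some (li, fh) →
    InvA hs prev next fi fh li bl s →
    ((rest.foldl (pvStepA (hs.length : Int)) (prev, next, fi, fh, li, fh, bl, s)).2.2.2.2.2.2.2 +
     (rest.foldl (pvStepA (hs.length : Int)) (prev, next, fi, fh, li, fh, bl, s)).2.2.2.2.2.2.1 *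
     ((rest.foldl (pvStepA (hs.length : Int)) (prev, next, fi, fh, li, fh, bl, s)).2.2.2.2.2.2.1 - 1)
       = pvScan hs) := by
  induction rest with
  | nil =>
    intro done prev next fi fh li bl s hperm hsort hlast hInv
    simp only [List.foldl_nil]
    have hproc : ∀ j : Nat, j < hs.length → hAt hs j < fh ∨ (hAt hs j = fh ∧ (j : Int) ≤ li) := by
      intro j hj
      have hmem : ((j : Int), hAt hs j) ∈ done ++ ([] : List (Int × Int)) :=
        hperm.mem_iff.mpr ((pv_mem_enumerate hs _).mpr ⟨j, hj, rfl⟩)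
      have hmem' : ((j : Int), hAt hs j) ∈ done := by simpa using hmem
      rcases pv_done_key done [] li fh hsort hlast _ hmem' with heq | hlt
      · rcases Prod.mk.injEq .. ▸ heq with ⟨h1, h2⟩
        right; exact ⟨h2, le_of_eq h1⟩
      · rw [keyLt_iff] at hlt; omega
    have hend : ∀ c : Nat, li < (c : Int) → c < hs.length → hAt hs c = fh →
        ∃ m : Nat, li < (m : Int) ∧ (m : Int) < (c : Int) ∧ fh < hAt hs m := by
      intro c h1 h2 h3
      rcases hproc c h2 with h4 | ⟨h4, h5⟩ <;> [omega; omega]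
    have hblk : (Finset.range hs.length).filter (fun j => ¬ aliveb hs fh fi j = false) =
        blockSet hs fh fi li := by
      ext j
      simp only [Finset.mem_filter, Finset.mem_range, Bool.not_eq_false, mem_blockSet]
      constructor
      · rintro ⟨hj, halive⟩
        rw [aliveb_true_iff] at halive
        rcases hproc j hj with h4 | ⟨h4, h5⟩ <;> rcases halive with h6 | ⟨h6, h7⟩
        · omega
        · omega
        · omega
        · exact ⟨hj, h7, h5, h6⟩
      · rintro ⟨hj, h1, h2, h3⟩
        exact ⟨hj, (aliveb_true_iff ..).mpr (Or.inr ⟨h3, h1⟩)⟩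
    rw [pvScan_eq_sum,
      ← Finset.sum_filter_add_sum_filter_not (Finset.range hs.length)
        (fun j => aliveb hs fh fi j = false), hblk,
      pv_block_sum hs fh fi li hInv.hmid hend,
      ← hInv.hbl]
    rw [show (∑ j ∈ (Finset.range hs.length).filter (fun j => aliveb hs fh fi j = false),
        pvTerm hs j) = closedSum hs fh fi from rfl, ← hInv.hsum]
  | cons e rest' ih =>
    intro done prev next fi fh li bl s hperm hsort hlast hInv
    obtain ⟨i, h⟩ := e
    obtain ⟨k, hkn, hki, hkh⟩ : ∃ k : Nat, k < hs.length ∧ i = (k : Int) ∧ h = hAt hs k := by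
      have hmem : (i, h) ∈ done ++ (i, h) :: rest' := by simp
      obtain ⟨k, hk1, hk2⟩ := (pv_mem_enumerate hs _).mp (hperm.mem_iff.mp hmem)
      rcases Prod.mk.injEq .. ▸ hk2 with ⟨h1, h2⟩
      exact ⟨k, hk1, h1, h2⟩
    have hfil := hInv.hfil
    have hfi0 := hInv.hfi0
    have hlin := hInv.hlin
    have hkey : keyLt (li, fh) (i, h) :=
      pv_rest_key done _ li fh hsort hlast _ (by simp)
    have hhead : ∀ q ∈ rest', keyLt (i, h) q := by
      have := (List.pairwise_append.mp hsort).2.1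
      exact (List.pairwise_cons.mp this).1
    have hLnn : 0 ≤ li := le_trans hInv.hfi0 hInv.hfil
    have hLn : li.toNat < hs.length := by have := hInv.hlin; omega
    have hLcast : (li.toNat : Int) = li := Int.toNat_of_nonneg hLnn
    have haliveL : aliveb hs fh fi li.toNat = true :=
      (aliveb_true_iff ..).mpr (Or.inr ⟨hInv.hhli, by rw [hLcast]; exact hInv.hfil⟩)
    have hnextL := hInv.hnext li.toNat hLn haliveL
    rw [hLcast] at hnextL
    have hpg : PySem.List.pyGetD next li 0 = next.getD li.toNat 0 := by
      rw [pv_pyGetD next li hLnn]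
    have hadj : ∀ m : Nat, m < hs.length → keyLt (li, fh) ((m : Int), hAt hs m) →
        keyLt ((m : Int), hAt hs m) (i, h) → False := by
      intro m hm hk1 hk2
      have hmem : ((m : Int), hAt hs m) ∈ done ++ (i, h) :: rest' :=
        hperm.mem_iff.mpr ((pv_mem_enumerate hs _).mpr ⟨m, hm, rfl⟩)
      have hrest := pv_unprocessed done _ li fh _ hsort hlast hmem hk1
      rcases List.mem_cons.mp hrest with heq | hmem'
      · exact keyLt_irrefl _ (heq ▸ hk2)
      · exact keyLt_asymm _ _ hk2 (hhead _ hmem')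
    have hfh_le : fh ≤ h := by rw [keyLt_iff] at hkey; omega
    have hIAliveOld : aliveb hs fh fi k = true := by
      rw [aliveb_true_iff]
      rcases (keyLt_iff _ _ _ _).mp hkey with h1 | ⟨h1, h2⟩
      · left; omega
      · right; constructor
        · omega
        · have := hInv.hfil; omega
    simp only [List.foldl_cons]
    by_cases hc : h = fh ∧ i = PySem.List.pyGetD next li 0
    · -- CASE 1: the entry extends the current block
      have hstep : pvStepA (hs.length : Int) (prev, next, fi, fh, li, fh, bl, s) (i, h) =
          (prev, next, fi, fh, i, fh, bl + 1, s) := by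
        simp only [pvStepA, if_pos hc]
      rw [hstep]
      obtain ⟨hhfh, hini⟩ := hc
      have hini' : i = next.getD li.toNat 0 := by rw [hini, hpg]
      have hlii : li < i := by rw [hini']; exact hnextL.1
      have hdeadmid : ∀ m : Nat, li < (m : Int) → (m : Int) < i → aliveb hs fh fi m = false := by
        intro m h1 h2
        exact hnextL.2.2.2 m h1 (by rw [← hini']; exact h2)
      have hBS : blockSet hs fh fi i = insert k (blockSet hs fh fi li) := by
        ext m
        simp only [mem_blockSet, Finset.mem_insert]
        constructor
        · rintro ⟨hm, h1, h2, h3⟩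
          by_cases hmli : (m : Int) ≤ li
          · right; exact ⟨hm, h1, hmli, h3⟩
          · by_cases hmi : (m : Int) = i
            · left; omega
            · exfalso
              have := hdeadmid m (by omega) (by omega)
              rw [aliveb_false_iff] at this
              exact this (Or.inr ⟨h3, h1⟩)
        · rintro hm
          rcases hm with rfl | ⟨hm, h1, h2, h3⟩
          · exact ⟨hkn, by have := hInv.hfil; omega, by omega, by rw [← hkh, hhfh]⟩
          · exact ⟨hm, h1, by omega, h3⟩
      have hknot : k ∉ blockSet hs fh fi li := by
        rw [mem_blockSet]; rintro ⟨_, _, h2, _⟩; omega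
      have hInv' : InvA hs prev next fi fh i (bl + 1) s := by
        refine ⟨hInv.hfi0, by have := hInv.hfil; omega, by omega, hInv.hhfi, ?_, ?_, ?_,
          hInv.hgs, hInv.hplen, hInv.hnlen, hInv.hnext, hInv.hprev, hInv.hsum⟩
        · have : i.toNat = k := by omega
          rw [this, ← hkh, hhfh]
        · intro m h1 h2
          by_cases hmli : (m : Int) < li
          · exact hInv.hmid m h1 hmli
          · by_cases hmeq : (m : Int) = li
            · have : m = li.toNat := by omega
              rw [this, hInv.hhli]
            · have := hdeadmid m (by omega) h2
              rw [aliveb_false_iff] at this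
              by_cases h5 : hAt hs m = fh
              · exact absurd (Or.inr ⟨h5, by omega⟩) this
              · have h6 : ¬ fh < hAt hs m := fun hx => this (Or.inl hx)
                omega
        · rw [hBS, Finset.card_insert_of_notMem hknot, hInv.hbl]
          push_cast
          ring
      have hlast' : (done ++ [(i, h)]).getLast? = some (i, fh) := by
        rw [List.getLast?_concat, hhfh]
      have happ : (done ++ [(i, h)]) ++ rest' = done ++ (i, h) :: rest' := by simp
      exact ih (done ++ [(i, h)]) prev next fi fh i (bl + 1) s
        (by rw [happ]; exact hperm) (by rw [happ]; exact hsort) hlast' hInv'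
    · -- CASE 2: the current block closes, gets counted and spliced out
      have hlif : h = fh → li < i := by
        intro hhfh
        rcases (keyLt_iff _ _ _ _).mp hkey with h1 | ⟨h1, h2⟩ <;> omega
      obtain ⟨hni1, hni2, hni3, hni4⟩ := hnextL
      have hFnn : 0 ≤ fi := hInv.hfi0
      have hFn : fi.toNat < hs.length := by
        have := hInv.hfil; have := hInv.hlin; omega
      have hFcast : (fi.toNat : Int) = fi := Int.toNat_of_nonneg hFnn
      have haliveF : aliveb hs fh fi fi.toNat = true :=
        (aliveb_true_iff ..).mpr (Or.inr ⟨hInv.hhfi, by rw [hFcast]⟩)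
      have hprevF := hInv.hprev fi.toNat hFn haliveF
      rw [hFcast] at hprevF
      set Pi := prev.getD fi.toNat 0 with hPi_def
      set ni := next.getD li.toNat 0 with hni_def
      obtain ⟨hPi1, hPi2, hPi3, hPi4⟩ := hprevF
      have hpgP : PySem.List.pyGetD prev fi 0 = Pi := by
        rw [pv_pyGetD prev fi hFnn]
      have hninn : 0 ≤ ni := by omega
      have hnicast : (ni.toNat : Int) = ni := Int.toNat_of_nonneg hninn
      set nextN := if 0 ≤ Pi then next.set Pi.toNat ni else next with hNdef
      set prevN := if ni < (hs.length : Int) then prev.set ni.toNat Pi else prev with hPdef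
      have hstep : pvStepA (hs.length : Int) (prev, next, fi, fh, li, fh, bl, s) (i, h) =
          (prevN, nextN, i, h, i, h, 1, s + bl * (bl - 1)) := by
        have hc2 : ¬ (h = fh ∧ i = ni) := by rw [hpg] at hc; exact hc
        rw [hNdef, hPdef]
        by_cases hp : 0 ≤ Pi <;> by_cases hq : ni < (hs.length : Int) <;>
          simp [pvStepA, hpg, hpgP, hc2, hp, hq, ge_iff_le,
            PySem.List.pySetD_of_nonneg, hninn]
      have hMidLe : ∀ m : Nat, fi ≤ (m : Int) → (m : Int) ≤ li → hAt hs m ≤ fh := by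
        intro m h1 h2
        by_cases he1 : (m : Int) = fi
        · have hm : m = fi.toNat := by omega
          rw [hm, hInv.hhfi]
        · by_cases he2 : (m : Int) = li
          · have hm : m = li.toNat := by omega
            rw [hm, hInv.hhli]
          · have := hInv.hmid m (by omega) (by omega)
            omega
      have hTal : h = fh → ni < i ∧ fh < hAt hs ni.toNat := by
        intro hhfh
        have hlii : li < i := hlif hhfh
        have hnei : ¬ i = ni := fun he => hc ⟨hhfh, by rw [hpg]; exact he⟩
        have hnile : ni ≤ i := by
          by_contra hgt
          have hd := hni4 k (by omega) (by omega)
          exact absurd hIAliveOld (by simp [hd])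
        have hnilt : ni < i := by omega
        have hnin : ni < (hs.length : Int) := by omega
        have halni := hni3 hnin
        rw [aliveb_true_iff] at halni
        rcases halni with hx | ⟨hx1, hx2⟩
        · exact ⟨hnilt, hx⟩
        · exfalso
          refine hadj ni.toNat (by omega) ?_ ?_
          · rw [keyLt_iff]; right; rw [hnicast]; exact ⟨hx1.symm, hni1⟩
          · rw [keyLt_iff]; right; rw [hnicast]; exact ⟨by omega, hnilt⟩
      have hOldDeadNew : ∀ m : Nat, aliveb hs fh fi m = false → aliveb hs h i m = false := by
        intro m hm
        rw [aliveb_false_iff] at hm ⊢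
        intro hcon
        apply hm
        rcases hcon with h1 | ⟨h1, h2⟩
        · left; omega
        · rcases lt_or_eq_of_le hfh_le with hlt | heq
          · left; omega
          · have := hlif heq.symm
            right; exact ⟨by omega, by omega⟩
      have hR3 : ∀ j : Nat, j < hs.length →
          (aliveb hs h i j = true ↔ (aliveb hs fh fi j = true ∧ j ∉ blockSet hs fh fi li)) := by
        intro j hj
        constructor
        · intro hal
          rw [aliveb_true_iff] at hal
          rcases hal with h1 | ⟨h1, h2⟩
          · refine ⟨(aliveb_true_iff ..).mpr (Or.inl (by omega)), ?_⟩
            rw [mem_blockSet]; rintro ⟨_, _, _, h4⟩; omega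
          · rcases lt_or_eq_of_le hfh_le with hlt | heq
            · refine ⟨(aliveb_true_iff ..).mpr (Or.inl (by omega)), ?_⟩
              rw [mem_blockSet]; rintro ⟨_, _, _, h4⟩; omega
            · have hlii := hlif heq.symm
              refine ⟨(aliveb_true_iff ..).mpr (Or.inr ⟨by omega, by omega⟩), ?_⟩
              rw [mem_blockSet]; rintro ⟨_, _, h4, _⟩; omega
        · rintro ⟨hal, hnb⟩
          rw [aliveb_true_iff] at hal
          rw [mem_blockSet] at hnb
          have hkgt : keyLt (li, fh) ((j : Int), hAt hs j) := by
            rw [keyLt_iff]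
            rcases hal with h1 | ⟨h1, h2⟩
            · left; omega
            · right
              have hnle : ¬ ((j : Int) ≤ li) := fun hle => hnb ⟨hj, h2, hle, h1⟩
              exact ⟨by omega, by omega⟩
          have hmem : ((j : Int), hAt hs j) ∈ done ++ (i, h) :: rest' :=
            hperm.mem_iff.mpr ((pv_mem_enumerate hs _).mpr ⟨j, hj, rfl⟩)
          have hrest := pv_unprocessed done _ li fh _ hsort hlast hmem hkgt
          rw [aliveb_true_iff]
          rcases List.mem_cons.mp hrest with heq | hmem'
          · rcases Prod.mk.injEq .. ▸ heq with ⟨e1, e2⟩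
            right; exact ⟨by omega, by omega⟩
          · have hq := hhead _ hmem'
            rw [keyLt_iff] at hq
            rcases hq with h1 | ⟨h1, h2⟩
            · left; omega
            · right; exact ⟨by omega, by omega⟩
      have hend' : ∀ c : Nat, li < (c : Int) → c < hs.length → hAt hs c = fh →
          ∃ m : Nat, li < (m : Int) ∧ (m : Int) < (c : Int) ∧ fh < hAt hs m := by
        intro c h1 h2 h3
        have hkgt : keyLt (li, fh) ((c : Int), hAt hs c) := by
          rw [keyLt_iff]; right; exact ⟨h3.symm, h1⟩
        have hmem : ((c : Int), hAt hs c) ∈ done ++ (i, h) :: rest' :=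
          hperm.mem_iff.mpr ((pv_mem_enumerate hs _).mpr ⟨c, h2, rfl⟩)
        have hrest := pv_unprocessed done _ li fh _ hsort hlast hmem hkgt
        rcases List.mem_cons.mp hrest with heq | hmem'
        · rcases Prod.mk.injEq .. ▸ heq with ⟨e1, e2⟩
          have hhfh : h = fh := by omega
          obtain ⟨hv1, hv2⟩ := hTal hhfh
          exact ⟨ni.toNat, by omega, by omega, hv2⟩
        · have hq := hhead _ hmem'
          rw [keyLt_iff] at hq
          rcases hq with h4 | ⟨h4, h5⟩
          · exact (by omega : False).elim
          · have hhfh : h = fh := by omega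
            obtain ⟨hv1, hv2⟩ := hTal hhfh
            exact ⟨ni.toNat, by omega, by omega, hv2⟩
      have hBS1 : blockSet hs h i i = {k} := by
        ext m
        simp only [mem_blockSet, Finset.mem_singleton]
        constructor
        · rintro ⟨hm, h1, h2, h3⟩; omega
        · rintro rfl; exact ⟨hkn, by omega, by omega, by omega⟩
      have hsplit : (Finset.range hs.length).filter (fun j => aliveb hs h i j = false) =
          ((Finset.range hs.length).filter (fun j => aliveb hs fh fi j = false)) ∪
            blockSet hs fh fi li := by
        ext j
        simp only [Finset.mem_filter, Finset.mem_range, Finset.mem_union]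
        constructor
        · rintro ⟨hj, hdead⟩
          by_cases hb : j ∈ blockSet hs fh fi li
          · right; exact hb
          · left
            refine ⟨hj, ?_⟩
            cases hx : aliveb hs fh fi j
            · rfl
            · have := (hR3 j hj).mpr ⟨hx, hb⟩
              rw [hdead] at this
              exact absurd this (by simp)
        · rintro (⟨hj, hdead⟩ | hb)
          · exact ⟨hj, hOldDeadNew j hdead⟩
          · have hj : j < hs.length := by
              have := (mem_blockSet ..).mp hb; exact this.1
            refine ⟨hj, ?_⟩
            cases hx : aliveb hs h i j
            · rfl
            · exact absurd hb ((hR3 j hj).mp hx).2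
      have hdisj : Disjoint
          ((Finset.range hs.length).filter (fun j => aliveb hs fh fi j = false))
          (blockSet hs fh fi li) := by
        rw [Finset.disjoint_left]
        intro a ha hb
        rw [Finset.mem_filter] at ha
        rw [mem_blockSet] at hb
        have : aliveb hs fh fi a = true := (aliveb_true_iff ..).mpr (Or.inr ⟨hb.2.2.2, hb.2.1⟩)
        rw [ha.2] at this
        exact absurd this (by simp)
      have hsum' : s + bl * (bl - 1) = closedSum hs h i := by
        rw [hInv.hsum, hInv.hbl,
          ← pv_block_sum hs fh fi li hInv.hmid hend']
        simp only [closedSum]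
        rw [hsplit, Finset.sum_union hdisj]
      have hNlen : nextN.length = hs.length := by
        rw [hNdef]; split <;> simp [hInv.hnlen]
      have hPlen : prevN.length = hs.length := by
        rw [hPdef]; split <;> simp [hInv.hplen]
      have hN1 : ∀ j : Nat, nextN.getD j 0 =
          if 0 ≤ Pi ∧ j = Pi.toNat then ni else next.getD j 0 := by
        intro j
        rw [hNdef]
        by_cases hp : 0 ≤ Pi
        · rw [if_pos hp, pv_getD_set next Pi.toNat ni j (by rw [hInv.hnlen]; omega)]
          by_cases hj : j = Pi.toNat
          · rw [if_pos hj, if_pos ⟨hp, hj⟩]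
          · rw [if_neg hj, if_neg (fun hx => hj hx.2)]
        · rw [if_neg hp, if_neg (fun hx => hp hx.1)]
      have hP1 : ∀ j : Nat, prevN.getD j 0 =
          if ni < (hs.length : Int) ∧ j = ni.toNat then Pi else prev.getD j 0 := by
        intro j
        rw [hPdef]
        by_cases hq : ni < (hs.length : Int)
        · rw [if_pos hq, pv_getD_set prev ni.toNat Pi j (by rw [hInv.hplen]; omega)]
          by_cases hj : j = ni.toNat
          · rw [if_pos hj, if_pos ⟨hq, hj⟩]
          · rw [if_neg hj, if_neg (fun hx => hj hx.2)]
        · rw [if_neg hq, if_neg (fun hx => hq hx.1)]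
      have hdeadPiNi : ∀ m : Nat, Pi < (m : Int) → (m : Int) < ni → aliveb hs h i m = false := by
        intro m h1 h2
        by_cases hz1 : (m : Int) < fi
        · exact hOldDeadNew m (hPi4 m h1 hz1)
        · by_cases hz2 : (m : Int) ≤ li
          · rw [aliveb_false_iff]
            have hle := hMidLe m (by omega) hz2
            rintro (hx | ⟨hx1, hx2⟩)
            · omega
            · rcases lt_or_eq_of_le hfh_le with hlt | heq
              · omega
              · have := hlif heq.symm; omega
          · exact hOldDeadNew m (hni4 m (by omega) h2)
      have hnext' : ∀ j : Nat, j < hs.length → aliveb hs h i j = true →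
          (j : Int) < nextN.getD j 0 ∧ nextN.getD j 0 ≤ (hs.length : Int) ∧
          (nextN.getD j 0 < (hs.length : Int) → aliveb hs h i (nextN.getD j 0).toNat = true) ∧
          (∀ m : Nat, (j : Int) < (m : Int) → (m : Int) < nextN.getD j 0 →
            aliveb hs h i m = false) := by
        intro j hj halj
        have hold := (hR3 j hj).mp halj
        rw [hN1 j]
        by_cases hcase : 0 ≤ Pi ∧ j = Pi.toNat
        · rw [if_pos hcase]
          obtain ⟨hp, rfl⟩ := hcase
          refine ⟨by omega, by omega, ?_, ?_⟩
          · intro hni_n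
            rw [hR3 ni.toNat (by omega)]
            refine ⟨hni3 hni_n, ?_⟩
            rw [mem_blockSet]
            rintro ⟨_, _, hx, _⟩
            omega
          · intro m hm1 hm2
            exact hdeadPiNi m (by omega) hm2
        · rw [if_neg hcase]
          obtain ⟨ho1, ho2, ho3, ho4⟩ := hInv.hnext j hj hold.1
          refine ⟨ho1, ho2, ?_, ?_⟩
          · intro hw
            have hwa := ho3 hw
            have hwnn : 0 ≤ next.getD j 0 := by omega
            rw [hR3 (next.getD j 0).toNat (by omega)]
            refine ⟨hwa, ?_⟩
            rw [mem_blockSet]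
            rintro ⟨hx0, hx1, hx2, hx3⟩
            have hjnb := hold.2
            rw [mem_blockSet] at hjnb
            by_cases hjfi : (j : Int) < fi
            · have hjPi : (j : Int) ≤ Pi := by
                by_contra hgt
                have hd := hPi4 j (by omega) hjfi
                exact absurd hold.1 (by simp [hd])
              have hjPi' : (j : Int) < Pi := by
                have hne2 : ¬ (j = Pi.toNat) := fun hx => hcase ⟨by omega, hx⟩
                omega
              have hd := ho4 Pi.toNat (by omega) (by omega)
              exact absurd (hPi3 (by omega)) (by simp [hd])
            · have hjli : li < (j : Int) := by
                by_cases hjle : (j : Int) ≤ li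
                · exfalso
                  have hle := hMidLe j (by omega) hjle
                  rcases (aliveb_true_iff ..).mp hold.1 with hx | ⟨hy1, hy2⟩
                  · omega
                  · exact hjnb ⟨hj, hy2, hjle, hy1⟩
                · omega
              omega
          · intro m hm1 hm2
            exact hOldDeadNew m (ho4 m hm1 hm2)
      have hprev' : ∀ j : Nat, j < hs.length → aliveb hs h i j = true →
          prevN.getD j 0 < (j : Int) ∧ -1 ≤ prevN.getD j 0 ∧
          (0 ≤ prevN.getD j 0 → aliveb hs h i (prevN.getD j 0).toNat = true) ∧
          (∀ m : Nat, prevN.getD j 0 < (m : Int) → (m : Int) < (j : Int) →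
            aliveb hs h i m = false) := by
        intro j hj halj
        have hold := (hR3 j hj).mp halj
        rw [hP1 j]
        by_cases hcase : ni < (hs.length : Int) ∧ j = ni.toNat
        · rw [if_pos hcase]
          obtain ⟨hw, rfl⟩ := hcase
          refine ⟨by omega, hPi2, ?_, ?_⟩
          · intro hp
            rw [hR3 Pi.toNat (by omega)]
            refine ⟨hPi3 hp, ?_⟩
            rw [mem_blockSet]
            rintro ⟨_, hx1, _, _⟩
            omega
          · intro m hm1 hm2
            exact hdeadPiNi m hm1 (by omega)
        · rw [if_neg hcase]
          obtain ⟨ho1, ho2, ho3, ho4⟩ := hInv.hprev j hj hold.1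
          refine ⟨ho1, ho2, ?_, ?_⟩
          · intro hu
            have hua := ho3 hu
            rw [hR3 (prev.getD j 0).toNat (by omega)]
            refine ⟨hua, ?_⟩
            rw [mem_blockSet]
            rintro ⟨hx0, hx1, hx2, hx3⟩
            have hjnb := hold.2
            rw [mem_blockSet] at hjnb
            have hjli : li < (j : Int) := by
              by_cases hjle : (j : Int) ≤ li
              · exfalso
                rcases (aliveb_true_iff ..).mp hold.1 with hy | ⟨hy1, hy2⟩
                · have := hMidLe j (by omega) hjle; omega
                · exact hjnb ⟨hj, hy2, hjle, hy1⟩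
              · omega
            by_cases huli : prev.getD j 0 < li
            · have hd := ho4 li.toNat (by omega) (by omega)
              exact absurd haliveL (by simp [hd])
            · have hueq : prev.getD j 0 = li := by omega
              have hnin2 : ni < (hs.length : Int) := by
                by_contra hx
                have hd := hni4 j (by omega) (by omega)
                exact absurd hold.1 (by simp [hd])
              have hnj : ¬ (j = ni.toNat) := fun hx => hcase ⟨hnin2, hx⟩
              by_cases hniw : ni < (j : Int)
              · have hd := ho4 ni.toNat (by omega) (by omega)
                exact absurd (hni3 hnin2) (by simp [hd])
              · have hjni' : (j : Int) < ni := by omega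
                have hd := hni4 j (by omega) hjni'
                exact absurd hold.1 (by simp [hd])
          · intro m hm1 hm2
            exact hOldDeadNew m (ho4 m hm1 hm2)
      have hInv' : InvA hs prevN nextN i h i 1 (s + bl * (bl - 1)) := by
        refine ⟨by omega, le_refl i, by omega, ?_, ?_, ?_, ?_, ?_, hPlen, hNlen,
          hnext', hprev', hsum'⟩
        · have hik : i.toNat = k := by omega
          rw [hik]; exact hkh.symm
        · have hik : i.toNat = k := by omega
          rw [hik]; exact hkh.symm
        · intro m h1 h2; omega
        · rw [hBS1]; simp
        · intro j hji hjh
          rcases lt_or_eq_of_le hfh_le with hlt | heq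
          · exfalso
            refine hadj j (by omega) ?_ ?_
            · rw [keyLt_iff]; left; omega
            · rw [keyLt_iff]; right; exact ⟨by omega, hji⟩
          · have hhfh : h = fh := heq.symm
            obtain ⟨hv1, hv2⟩ := hTal hhfh
            have hlii := hlif hhfh
            by_cases hz1 : (j : Int) < fi
            · obtain ⟨m, hm1, hm2, hm3⟩ := hInv.hgs j hz1 (by omega)
              exact ⟨m, hm1, by omega, by omega⟩
            · by_cases hz2 : (j : Int) ≤ li
              · exact ⟨ni.toNat, by omega, by omega, by omega⟩
              · exfalso
                refine hadj j (by omega) ?_ ?_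
                · rw [keyLt_iff]; right; exact ⟨by omega, by omega⟩
                · rw [keyLt_iff]; right; exact ⟨by omega, hji⟩
      have hlast' : (done ++ [(i, h)]).getLast? = some (i, h) := List.getLast?_concat
      have happ : (done ++ [(i, h)]) ++ rest' = done ++ (i, h) :: rest' := by simp
      rw [hstep]
      exact ih (done ++ [(i, h)]) prevN nextN i h i 1 (s + bl * (bl - 1))
        (by rw [happ]; exact hperm) (by rw [happ]; exact hsort) hlast' hInv'

lemma pv_enum_nodup (hs : List Int) : (PySem.List.enumerate hs 0).Nodup := by
  have h := PySem.List.pairwise_lt_enumerate (xs := hs) (s := 0)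
  exact h.imp (fun hlt heq => by rw [heq] at hlt; exact lt_irrefl _ hlt)

lemma pv_range_getD (a : Int) (n j : Nat) (hj : j < n)
    (hlen : ((a + (n : Int)) - a).toNat = n) :
    (PySem.List.pyRange a (a + (n : Int)) 1).getD j 0 = a + (j : Int) := by
  rw [PySem.List.pyRange_one, hlen, List.getD_eq_getElem?_getD, List.getElem?_map,
    List.getElem?_range hj]
  rfl

lemma pv_final (hs : List Int) (hn : 2 ≤ hs.length) :
    count_valid_paths hs = pvScan hs := by
  have hE : ∃ e0 tl, PySem.List.sorted (PySem.List.enumerate hs 0)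
      (fun t => toLex (t.2, t.1)) false = e0 :: tl := by
    rcases hX : PySem.List.sorted (PySem.List.enumerate hs 0) (fun t => toLex (t.2, t.1)) false with
      _ | ⟨e0, tl⟩
    · have := congrArg List.length hX
      rw [PySem.List.length_sorted, PySem.List.length_enumerate] at this
      simp only [List.length_nil] at this
      omega
    · exact ⟨e0, tl, rfl⟩
  obtain ⟨e0, tl, hE⟩ := hE
  have hperm : (e0 :: tl).Perm (PySem.List.enumerate hs 0) := by
    rw [← hE]; exact PySem.List.sorted_perm ..
  have hpw : (e0 :: tl).Pairwise
      (fun p q : Int × Int => toLex (p.2, p.1) ≤ toLex (q.2, q.1)) := by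
    rw [← hE]; exact PySem.List.sorted_pairwise ..
  have hnd : (e0 :: tl).Nodup := hperm.nodup_iff.mpr (pv_enum_nodup hs)
  have hsort : (e0 :: tl).Pairwise keyLt := by
    rw [List.pairwise_iff_getElem] at hpw ⊢
    intro p q hp hq hpq
    have hle := hpw p q hp hq hpq
    have hne : (e0 :: tl)[p] ≠ (e0 :: tl)[q] := by
      intro he
      exact absurd ((List.Nodup.getElem_inj_iff hnd).mp he) (by omega)
    have hkne : toLex ((e0 :: tl)[p].2, (e0 :: tl)[p].1) ≠
        toLex ((e0 :: tl)[q].2, (e0 :: tl)[q].1) := by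
      intro he
      apply hne
      have := toLex_inj.mp he
      rcases Prod.mk.injEq .. ▸ this with ⟨h1, h2⟩
      exact Prod.ext h2 h1
    exact (keyLt_bridge _ _).mp (lt_of_le_of_ne hle hkne)
  obtain ⟨k0, hk0n, hk0e⟩ := (pv_mem_enumerate hs e0).mp (hperm.mem_iff.mp List.mem_cons_self)
  have hminimal : ∀ q ∈ tl, keyLt e0 q := (List.pairwise_cons.mp hsort).1
  have hallalive : ∀ j : Nat, j < hs.length → aliveb hs (hAt hs k0) (k0 : Int) j = true := by
    intro j hj
    have hmem : ((j : Int), hAt hs j) ∈ e0 :: tl :=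
      hperm.mem_iff.mpr ((pv_mem_enumerate hs _).mpr ⟨j, hj, rfl⟩)
    rw [aliveb_true_iff]
    rcases List.mem_cons.mp hmem with heq | hmem'
    · rw [hk0e] at heq
      rcases Prod.mk.injEq .. ▸ heq with ⟨e1, e2⟩
      right; exact ⟨by omega, by omega⟩
    · have hq := hminimal _ hmem'
      rw [hk0e, keyLt_iff] at hq
      rcases hq with h1 | ⟨h1, h2⟩
      · left; omega
      · right; exact ⟨by omega, by omega⟩
  have hprevget : ∀ j : Nat, j < hs.length →
      (PySem.List.pyRange (-1) ((hs.length : Int) - 1) 1).getD j 0 = (j : Int) - 1 := by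
    intro j hj
    have := pv_range_getD (-1) hs.length j hj (by omega)
    rw [show (-1 : Int) + (hs.length : Int) = (hs.length : Int) - 1 from by ring] at this
    rw [this]; ring
  have hnextget : ∀ j : Nat, j < hs.length →
      (PySem.List.pyRange 1 ((hs.length : Int) + 1) 1).getD j 0 = (j : Int) + 1 := by
    intro j hj
    have := pv_range_getD 1 hs.length j hj (by omega)
    rw [show (1 : Int) + (hs.length : Int) = (hs.length : Int) + 1 from by ring] at this
    rw [this]; ring
  have hplen0 : (PySem.List.pyRange (-1) ((hs.length : Int) - 1) 1).length = hs.length := by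
    rw [PySem.List.length_pyRange_one]; omega
  have hnlen0 : (PySem.List.pyRange 1 ((hs.length : Int) + 1) 1).length = hs.length := by
    rw [PySem.List.length_pyRange_one]; omega
  have hBS0 : blockSet hs (hAt hs k0) (k0 : Int) (k0 : Int) = {k0} := by
    ext m
    simp only [mem_blockSet, Finset.mem_singleton]
    constructor
    · rintro ⟨hm, h1, h2, h3⟩; omega
    · rintro rfl; exact ⟨hk0n, le_refl _, le_refl _, rfl⟩
  have hInv0 : InvA hs (PySem.List.pyRange (-1) ((hs.length : Int) - 1) 1)
      (PySem.List.pyRange 1 ((hs.length : Int) + 1) 1)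
      (k0 : Int) (hAt hs k0) (k0 : Int) 1 0 := by
    refine ⟨Int.natCast_nonneg k0, le_refl _, by omega, ?_, ?_, ?_, ?_, ?_, hplen0, hnlen0,
      ?_, ?_, ?_⟩
    · rw [Int.toNat_natCast]
    · rw [Int.toNat_natCast]
    · intro m h1 h2; omega
    · rw [hBS0]; simp
    · intro j h1 h2
      exfalso
      have := hallalive j (by omega)
      rw [aliveb_true_iff] at this
      rcases this with h3 | ⟨h3, h4⟩ <;> omega
    · intro j hj _
      rw [hnextget j hj]
      refine ⟨by omega, by omega, ?_, ?_⟩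
      · intro hlt
        have hc : ((j : Int) + 1).toNat = j + 1 := by omega
        rw [hc]
        exact hallalive (j + 1) (by omega)
      · intro m h1 h2; omega
    · intro j hj _
      rw [hprevget j hj]
      refine ⟨by omega, by omega, ?_, ?_⟩
      · intro hnn
        have hc : ((j : Int) - 1).toNat = j - 1 := by omega
        rw [hc]
        exact hallalive (j - 1) (by omega)
      · intro m h1 h2; omega
    · rw [closedSum]
      have : (Finset.range hs.length).filter
          (fun j => aliveb hs (hAt hs k0) (k0 : Int) j = false) = ∅ := by
        apply Finset.filter_eq_empty_iff.mpr
        intro j hj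
        rw [Finset.mem_range] at hj
        rw [hallalive j hj]
        simp
      rw [this, Finset.sum_empty]
  have hlast0 : [e0].getLast? = some ((k0 : Int), hAt hs k0) := by
    rw [hk0e]; rfl
  have hfold := pvFoldA hs tl [e0]
    (PySem.List.pyRange (-1) ((hs.length : Int) - 1) 1)
    (PySem.List.pyRange 1 ((hs.length : Int) + 1) 1)
    (k0 : Int) (hAt hs k0) (k0 : Int) 1 0
    (by simpa using hperm) (by simpa using hsort) hlast0 hInv0
  simp only [count_valid_paths, PySem.List.len_eq]
  rw [if_neg (by omega : ¬ ((hs.length : Int) < 2))]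
  rw [hE, PySem.List.pyGetD_zero_cons, PySem.List.slice_from_one]
  rw [hk0e]
  exact hfold

def pvN (y : Int) : List Int → Int
  | [] => 0
  | h :: t => (if h = y ∧ (∀ z ∈ t, z ≤ y) then 1 else 0) + pvN y t

def pvSC (y : Int) : List (Int × Int) → Int
  | [] => 0
  | (x, c) :: t => if x = y then c else pvSC y t

def pvTot (st : List (Int × Int)) : Int := (st.map (fun e => e.2 * (e.2 - 1))).sum

lemma pvSC_cons (y x c : Int) (t : List (Int × Int)) :
    pvSC y ((x, c) :: t) = if x = y then c else pvSC y t := rfl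

lemma pvPush_cons (h x c : Int) (t : List (Int × Int)) :
    pvPush ((x, c) :: t) h = if x = h then (x, c + 1) :: t else (h, 1) :: (x, c) :: t := rfl

lemma pvTot_cons (x c : Int) (t : List (Int × Int)) :
    pvTot ((x, c) :: t) = c * (c - 1) + pvTot t := by simp [pvTot]

lemma pvCnt_append (h x : Int) (t : List Int) :
    pvCnt h (t ++ [x]) = pvCnt h t + (if (∀ z ∈ t, z ≤ h) ∧ x = h then 2 else 0) := by
  induction t with
  | nil =>
    simp only [List.nil_append, pvCnt]
    by_cases hgt : x > h
    · rw [if_pos hgt, if_neg (fun hc => by have := hc.2; omega)]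
      omega
    · rw [if_neg hgt]
      by_cases hx : x = h
      · rw [if_pos hx, if_pos ⟨by simp, hx⟩]; omega
      · rw [if_neg hx, if_neg (fun hc => hx hc.2)]
  | cons y t ih =>
    simp only [List.cons_append, pvCnt]
    by_cases hgt : y > h
    · rw [if_pos hgt, if_pos hgt, if_neg (fun hc => by have := hc.1 y (by simp); omega)]
      omega
    · rw [if_neg hgt, if_neg hgt, ih]
      have hcond : ((∀ z ∈ y :: t, z ≤ h) ∧ x = h) ↔ ((∀ z ∈ t, z ≤ h) ∧ x = h) := by
        constructor
        · rintro ⟨h1, h2⟩; exact ⟨fun z hz => h1 z (by simp [hz]), h2⟩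
        · rintro ⟨h1, h2⟩
          refine ⟨fun z hz => ?_, h2⟩
          rcases List.mem_cons.mp hz with rfl | hz'
          · omega
          · exact h1 z hz'
      by_cases hc : (∀ z ∈ t, z ≤ h) ∧ x = h
      · rw [if_pos hc, if_pos (hcond.mpr hc)]; ring
      · rw [if_neg hc, if_neg (fun hq => hc (hcond.mp hq))]; ring

lemma pvScan_append (p : List Int) (x : Int) :
    pvScan (p ++ [x]) = pvScan p + 2 * pvN x p := by
  induction p with
  | nil => simp [pvScan, pvCnt, pvN]
  | cons h t ih =>
    simp only [List.cons_append, pvScan, pvN, ih, pvCnt_append]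
    by_cases hc : h = x
    · subst hc
      by_cases hall : ∀ z ∈ t, z ≤ h
      · rw [if_pos ⟨hall, rfl⟩, if_pos ⟨rfl, hall⟩]; ring
      · rw [if_neg (fun hq => hall hq.1), if_neg (fun hq => hall hq.2)]; ring
    · rw [if_neg (fun hq => hc hq.2.symm), if_neg (fun hq => hc hq.1)]; ring

lemma pvN_append (y x : Int) (p : List Int) :
    pvN y (p ++ [x]) = (if x ≤ y then pvN y p else 0) + (if y = x then 1 else 0) := by
  induction p with
  | nil =>
    simp only [List.nil_append, pvN]
    by_cases hc : y = x
    · rw [if_pos ⟨hc.symm, by simp⟩, if_pos hc, if_pos (le_of_eq hc.symm)]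
      simp
    · rw [if_neg (fun hq => hc hq.1.symm), if_neg hc]
      split <;> simp
  | cons h t ih =>
    simp only [List.cons_append, pvN, ih]
    have hall : (∀ z ∈ t ++ [x], z ≤ y) ↔ ((∀ z ∈ t, z ≤ y) ∧ x ≤ y) := by
      constructor
      · intro h1; exact ⟨fun z hz => h1 z (by simp [hz]), h1 x (by simp)⟩
      · rintro ⟨h1, h2⟩ z hz
        rcases List.mem_append.mp hz with hz' | hz'
        · exact h1 z hz'
        · simp at hz'; omega
    by_cases hx : x ≤ y
    · rw [if_pos hx]
      by_cases hc : h = y ∧ ∀ z ∈ t, z ≤ y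
      · rw [if_pos ⟨hc.1, hall.mpr ⟨hc.2, hx⟩⟩, if_pos hc, if_pos hx]; ring
      · rw [if_neg (fun hq => hc ⟨hq.1, (hall.mp hq.2).1⟩), if_neg hc, if_pos hx]; ring
    · rw [if_neg hx, if_neg (fun hq => hx (hall.mp hq.2).2),
        if_neg (fun hq : y = x => hx (le_of_eq hq.symm)), if_neg hx]
      omega

lemma pvPop_fst (h total : Int) (st : List (Int × Int)) :
    (pvPop st h total).1 = st.dropWhile (fun e => decide (e.1 < h)) := by
  induction st generalizing total with
  | nil => simp [pvPop]
  | cons e t ih =>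
    obtain ⟨x, c⟩ := e
    rw [pvPop, List.dropWhile_cons]
    by_cases hx : x < h
    · rw [if_pos hx, if_pos (by simpa using hx), ih]
    · rw [if_neg hx, if_neg (by simpa using hx)]

lemma pvPop_snd (h total : Int) (st : List (Int × Int)) :
    (pvPop st h total).2 = total + pvTot (st.takeWhile (fun e => decide (e.1 < h))) := by
  induction st generalizing total with
  | nil => simp [pvPop, pvTot]
  | cons e t ih =>
    obtain ⟨x, c⟩ := e
    rw [pvPop, List.takeWhile_cons]
    by_cases hx : x < h
    · rw [if_pos hx, if_pos (by simpa using hx), ih]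
      simp [pvTot]
      ring
    · rw [if_neg hx, if_neg (by simpa using hx)]
      simp [pvTot]

lemma pvTot_split (h : Int) (st : List (Int × Int)) :
    pvTot st = pvTot (st.takeWhile (fun e => decide (e.1 < h))) +
      pvTot (st.dropWhile (fun e => decide (e.1 < h))) := by
  rw [pvTot, pvTot, pvTot, ← List.sum_append, ← List.map_append,
    List.takeWhile_append_dropWhile]

lemma pv_drop_ge (h : Int) (st : List (Int × Int))
    (hpw : st.Pairwise (fun a b => a.1 < b.1)) :
    ∀ e ∈ st.dropWhile (fun e => decide (e.1 < h)), h ≤ e.1 := by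
  induction st with
  | nil => simp
  | cons a t ih =>
    rw [List.pairwise_cons] at hpw
    rw [List.dropWhile_cons]
    by_cases hx : a.1 < h
    · rw [if_pos (by simpa using hx)]
      exact ih hpw.2
    · rw [if_neg (by simpa using hx)]
      intro e he
      rcases List.mem_cons.mp he with rfl | he'
      · omega
      · have := hpw.1 e he'; omega

lemma pvSC_zero (y : Int) (st : List (Int × Int)) (hy : ∀ e ∈ st, y < e.1) :
    pvSC y st = 0 := by
  induction st with
  | nil => rfl
  | cons e t ih =>
    obtain ⟨x, c⟩ := e
    rw [pvSC_cons, if_neg (by have := hy (x, c) (by simp); simp at this; omega)]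
    exact ih (fun e he => hy e (by simp [he]))

lemma pvSC_drop (y h : Int) (st : List (Int × Int)) (hy : h ≤ y) :
    pvSC y (st.dropWhile (fun e => decide (e.1 < h))) = pvSC y st := by
  induction st with
  | nil => rfl
  | cons e t ih =>
    obtain ⟨x, c⟩ := e
    rw [List.dropWhile_cons]
    by_cases hx : x < h
    · rw [if_pos (by simpa using hx), ih, pvSC_cons, if_neg (by omega)]
    · rw [if_neg (by simpa using hx)]

lemma pvPush_tot (x : Int) (st : List (Int × Int))
    (hge : ∀ e ∈ st, x ≤ e.1) (hpw : st.Pairwise (fun a b => a.1 < b.1)) :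
    pvTot (pvPush st x) = pvTot st + 2 * pvSC x st := by
  cases st with
  | nil => simp [pvPush, pvTot, pvSC]
  | cons a t =>
    obtain ⟨x0, c⟩ := a
    rw [List.pairwise_cons] at hpw
    rw [pvPush_cons]
    by_cases he : x0 = x
    · rw [if_pos he, pvTot_cons, pvTot_cons, pvSC_cons, if_pos (by omega)]
      ring
    · rw [if_neg he]
      have h0 : x < x0 := by have := hge (x0, c) (by simp); simp at this; omega
      have hz : pvSC x ((x0, c) :: t) = 0 := by
        apply pvSC_zero
        intro e he'
        rcases List.mem_cons.mp he' with rfl | he''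
        · simpa using h0
        · have := hpw.1 e he''; omega
      rw [hz, pvTot_cons, pvTot_cons]
      ring

lemma pvPush_sc (y x : Int) (st : List (Int × Int))
    (hge : ∀ e ∈ st, x ≤ e.1) (hpw : st.Pairwise (fun a b => a.1 < b.1)) :
    pvSC y (pvPush st x) = if y = x then pvSC x st + 1 else pvSC y st := by
  cases st with
  | nil =>
    by_cases hy : y = x
    · rw [if_pos hy]
      show pvSC y [(x, 1)] = pvSC x [] + 1
      rw [pvSC_cons, if_pos hy.symm]
      rfl
    · rw [if_neg hy]
      show pvSC y [(x, 1)] = pvSC y []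
      rw [pvSC_cons, if_neg (fun h => hy h.symm)]
  | cons a t =>
    obtain ⟨x0, c⟩ := a
    rw [List.pairwise_cons] at hpw
    rw [pvPush_cons]
    by_cases he : x0 = x
    · rw [if_pos he]
      by_cases hy : y = x
      · rw [if_pos hy, pvSC_cons, pvSC_cons, if_pos (by omega), if_pos (by omega)]
      · rw [if_neg hy, pvSC_cons, pvSC_cons, if_neg (by omega), if_neg (by omega)]
    · rw [if_neg he]
      have h0 : x < x0 := by have := hge (x0, c) (by simp); simp at this; omega
      have hz : pvSC x ((x0, c) :: t) = 0 := by
        apply pvSC_zero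
        intro e he'
        rcases List.mem_cons.mp he' with rfl | he''
        · simpa using h0
        · have := hpw.1 e he''; omega
      by_cases hy : y = x
      · rw [if_pos hy, hz, pvSC_cons, if_pos hy.symm]
        ring
      · rw [if_neg hy, pvSC_cons, if_neg (fun h => hy h.symm), pvSC_cons]

lemma pvPush_pw (x : Int) (st : List (Int × Int))
    (hge : ∀ e ∈ st, x ≤ e.1) (hpw : st.Pairwise (fun a b => a.1 < b.1)) :
    (pvPush st x).Pairwise (fun a b => a.1 < b.1) := by
  cases st with
  | nil => simp [pvPush]
  | cons a t =>
    obtain ⟨x0, c⟩ := a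
    rw [List.pairwise_cons] at hpw
    rw [pvPush_cons]
    by_cases he : x0 = x
    · rw [if_pos he]
      exact List.pairwise_cons.mpr ⟨hpw.1, hpw.2⟩
    · rw [if_neg he]
      have h0 : x < x0 := by have := hge (x0, c) (by simp); simp at this; omega
      refine List.pairwise_cons.mpr ⟨?_, List.pairwise_cons.mpr ⟨hpw.1, hpw.2⟩⟩
      intro e he'
      rcases List.mem_cons.mp he' with rfl | he''
      · simpa using h0
      · have := hpw.1 e he''; simp; omega

lemma pvFoldB (rest : List Int) :
    ∀ (p : List Int) (st : List (Int × Int)) (total : Int),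
    total + pvTot st = pvScan p →
    (∀ y, pvN y p = pvSC y st) →
    st.Pairwise (fun a b => a.1 < b.1) →
    (rest.foldl pvStepB (st, total)).2 + pvTot (rest.foldl pvStepB (st, total)).1 =
      pvScan (p ++ rest) := by
  induction rest with
  | nil =>
    intro p st total h1 h2 h3
    simpa using h1
  | cons x rest' ih =>
    intro p st total h1 h2 h3
    simp only [List.foldl_cons]
    have hstep : pvStepB (st, total) x =
        (pvPush (st.dropWhile (fun e => decide (e.1 < x))) x,
         total + pvTot (st.takeWhile (fun e => decide (e.1 < x)))) := by
      simp only [pvStepB]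
      rw [pvPop_fst, pvPop_snd]
    rw [hstep]
    have hge := pv_drop_ge x st h3
    have hpw2 : (st.dropWhile (fun e => decide (e.1 < x))).Pairwise (fun a b => a.1 < b.1) :=
      h3.sublist (List.dropWhile_sublist _)
    have hscx : pvSC x (st.dropWhile (fun e => decide (e.1 < x))) = pvSC x st :=
      pvSC_drop x x st (le_refl x)
    have hinv1 : (total + pvTot (st.takeWhile (fun e => decide (e.1 < x)))) +
        pvTot (pvPush (st.dropWhile (fun e => decide (e.1 < x))) x) = pvScan (p ++ [x]) := by
      rw [pvPush_tot x _ hge hpw2, pvScan_append, hscx, ← h2 x]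
      have hsplit := pvTot_split x st
      omega
    have hinv2 : ∀ y, pvN y (p ++ [x]) =
        pvSC y (pvPush (st.dropWhile (fun e => decide (e.1 < x))) x) := by
      intro y
      rw [pvN_append, pvPush_sc y x _ hge hpw2]
      by_cases hy : y = x
      · subst hy
        rw [if_pos rfl, if_pos (le_refl y), if_pos rfl, hscx, h2]
      · rw [if_neg hy, if_neg hy]
        by_cases hxy : x ≤ y
        · rw [if_pos hxy, pvSC_drop y x st hxy, ← h2 y]
          ring
        · rw [if_neg hxy, pvSC_zero y _ (fun e he => by have := hge e he; omega)]
          ring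
    have hpw3 := pvPush_pw x _ hge hpw2
    have happ : p ++ x :: rest' = (p ++ [x]) ++ rest' := by simp
    rw [happ]
    exact ih (p ++ [x]) _ _ hinv1 hinv2 hpw3

lemma pv_drain (l : List (Int × Int)) (acc : Int) :
    l.foldl (fun acc e => acc + e.2 * (e.2 - 1)) acc = acc + pvTot l := by
  induction l generalizing acc with
  | nil => simp [pvTot]
  | cons e t ih =>
    rw [List.foldl_cons, ih]
    simp [pvTot]
    ring

lemma pvAlt_eq_pvScan (heights : List Int) : count_valid_paths_alt heights = pvScan heights := by
  simp only [count_valid_paths_alt]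
  rw [pv_drain]
  have hrev : pvTot (heights.foldl pvStepB ([], 0)).1.reverse =
      pvTot (heights.foldl pvStepB ([], 0)).1 := by
    simp [pvTot]
  rw [hrev]
  have h := pvFoldB heights [] [] 0 (by simp [pvTot, pvScan]) (fun y => by simp [pvN, pvSC])
    (by simp)
  simpa using h

lemma pv_equiv (heights : List Int) :
    count_valid_paths heights = count_valid_paths_alt heights := by
  rw [pvAlt_eq_pvScan]
  match heights with
  | [] => rfl
  | [a] => rfl
  | a :: b :: t => exact pv_final (a :: b :: t) (by simp)

-- ===== VERDICT (by name: the statement is the Claim_ definition above) =====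
theorem count_valid_paths_spec : Claim_equal_count_valid_paths := by
  intro heights _hdom
  exact pv_equiv heights
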